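-- pv_equiv track=rewrite | github.com/Karanjot1995/data-structures-prep | Meta/Binary Search/index.py | nextAlphabeticalElement
-- ===== SOURCE A (Python) =====
-- def nextAlphabeticalElement(arr, target):
--   start = 0
--   end = len(arr)-1
--   res = arr[end]
--   while start<=end:
--     mid = int((start+end)/2)
--     if target == arr[mid]:
--       start = mid+1
--     if target < arr[mid]:
--       res = arr[mid]
--       end = mid-1
--     elif target > arr[mid]:
--       start = mid+1
--   return res
-- ===== SOURCE B (Python) =====
-- def nextAlphabeticalElement(arr, target):
--   def go(start, end, res):
--     if start > end:
--       return res
--     mid = (start + end) // 2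
--     if target < arr[mid]:
--       return go(start, mid - 1, arr[mid])
--     else:
--       return go(mid + 1, end, res)
--   return go(0, len(arr) - 1, arr[-1])
-- ===== Notes on version B (the rewrite author's own statement) =====
-- stated objective: simpler
-- what changed: The while-loop with three sequential if-tests and mutable start/end/res is replaced by a tail-recursive helper go(start, end, res) with a single two-way comparison (target < arr[mid] vs not), merging A's equal- and greater-branches which update the same state.
-- outside the precondition, e.g. on nextAlphabeticalElement([], 'a'): A raises IndexError, B raises IndexError
import Mathlib
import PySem

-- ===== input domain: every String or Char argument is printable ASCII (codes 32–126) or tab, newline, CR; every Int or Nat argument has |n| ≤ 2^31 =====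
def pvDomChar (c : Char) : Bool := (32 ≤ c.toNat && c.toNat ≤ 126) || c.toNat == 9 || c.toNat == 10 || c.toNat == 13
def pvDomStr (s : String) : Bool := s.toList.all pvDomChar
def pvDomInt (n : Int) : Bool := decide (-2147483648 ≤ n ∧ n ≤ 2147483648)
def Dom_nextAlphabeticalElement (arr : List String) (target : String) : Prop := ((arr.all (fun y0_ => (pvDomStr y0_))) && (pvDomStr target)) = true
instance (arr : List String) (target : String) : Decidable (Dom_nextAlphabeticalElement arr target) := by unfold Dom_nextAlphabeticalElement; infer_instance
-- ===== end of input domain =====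

-- B replaces A's while-loop (three sequential if-tests over mutable start/end/res) by a
-- tail-recursive helper with one two-way comparison; same asymptotics, simpler decomposition.

-- ===== PORT A =====
-- A's while-loop as recursion over the state (start, end, res); the Nat fuel only makes the
-- same computation total (each iteration shrinks e - start + 1 by at least one, so
-- fuel = arr.length + 1 is never exhausted; the loop body is unchanged).
-- mid = int((start+end)/2): inside the loop start+end ≥ 0, where Python's truncating
-- float division equals floor division, ported exactly as Int ediv by 2.
def nextAEloopA (arr : List String) (target : String) : Nat → Int → Int → String → String
  | 0, _, _, res => res
  | fuel + 1, start, e, res =>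
    if start ≤ e then
      -- mid = (start+e)/2; arr[mid] is re-read at each comparison, as in the Python
      if target == (PySem.List.pyGet? arr ((start + e) / 2)).getD "" then
        nextAEloopA arr target fuel ((start + e) / 2 + 1) e res        -- 'if target == arr[mid]: start = mid+1' (the two following tests are then false)
      else if target < (PySem.List.pyGet? arr ((start + e) / 2)).getD "" then
        nextAEloopA arr target fuel start ((start + e) / 2 - 1) ((PySem.List.pyGet? arr ((start + e) / 2)).getD "")  -- res = arr[mid]; end = mid-1
      else if (PySem.List.pyGet? arr ((start + e) / 2)).getD "" < target then
        nextAEloopA arr target fuel ((start + e) / 2 + 1) e res        -- start = mid+1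
      else
        res                                           -- unreachable: String is totally ordered (Python would loop forever)
    else res

def nextAlphabeticalElement (arr : List String) (target : String) : String :=
  let e : Int := (arr.length : Int) - 1
  let res := (PySem.List.pyGet? arr e).getD ""        -- arr[end]; IndexError on [] → excluded by Pre_
  nextAEloopA arr target (arr.length + 1) 0 e res

-- ===== PORT B =====
-- Source B's go(start, end, res), same totality fuel.
def nextAEgo (arr : List String) (target : String) : Nat → Int → Int → String → String
  | 0, _, _, res => res
  | fuel + 1, start, e, res =>
    if start > e then res
    else if target < (PySem.List.pyGet? arr (PySem.Int.floordiv (start + e) 2)).getD "" then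
      nextAEgo arr target fuel start (PySem.Int.floordiv (start + e) 2 - 1) ((PySem.List.pyGet? arr (PySem.Int.floordiv (start + e) 2)).getD "")
    else
      nextAEgo arr target fuel (PySem.Int.floordiv (start + e) 2 + 1) e res

def nextAlphabeticalElement_alt (arr : List String) (target : String) : String :=
  nextAEgo arr target (arr.length + 1) 0 ((arr.length : Int) - 1) ((PySem.List.pyGet? arr (-1)).getD "")

-- ===== PRECONDITION & SPEC =====
-- Pre_ excludes the empty list, on which A raises IndexError (arr[len(arr)-1] = arr[-1]).
def Pre_nextAlphabeticalElement (arr : List String) (target : String) : Prop := arr ≠ []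
instance (arr : List String) (target : String) : Decidable (Pre_nextAlphabeticalElement arr target) := by unfold Pre_nextAlphabeticalElement; infer_instance
def pvWitness_nextAlphabeticalElement : List String × String := (["ab", "cd", "ef"], "b")

def Spec_nextAlphabeticalElement (arr : List String) (target : String) (out : String) : Prop := out = nextAlphabeticalElement_alt arr target
instance (arr : List String) (target : String) (out : String) : Decidable (Spec_nextAlphabeticalElement arr target out) := by unfold Spec_nextAlphabeticalElement; infer_instance

-- ===== CLAIM (what is proved, stated in full; the proofs are below) =====
def Claim_equal_nextAlphabeticalElement : Prop := ∀ (arr : List String) (target : String), Dom_nextAlphabeticalElement arr target → Pre_nextAlphabeticalElement arr target → Spec_nextAlphabeticalElement arr target (nextAlphabeticalElement arr target)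

-- ===== LEMMAS AND PROOFS =====

-- The two loops agree on every state and fuel (no invariant needed: both are total via getD).
theorem loopA_eq_go (arr : List String) (target : String) :
    ∀ (fuel : Nat) (start e : Int) (res : String),
      nextAEloopA arr target fuel start e res = nextAEgo arr target fuel start e res := by
  intro fuel
  induction fuel with
  | zero => intro start e res; rfl
  | succ n ih =>
      intro start e res
      rw [nextAEloopA, nextAEgo]
      by_cases h : start ≤ e
      · rw [if_pos h, if_neg (by omega : ¬ start > e)]
        rw [PySem.Int.floordiv_eq_ediv_of_pos (by norm_num : (0:Int) < 2)]
        by_cases heq : target = (PySem.List.pyGet? arr ((start + e) / 2)).getD ""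
        · rw [if_pos (by simp [heq]), if_neg (by simp [heq]), ih]
        · rw [if_neg (by simp [heq])]
          by_cases hlt : target < (PySem.List.pyGet? arr ((start + e) / 2)).getD ""
          · rw [if_pos hlt, if_pos hlt, ih]
          · rw [if_neg hlt, if_neg hlt,
                if_pos (lt_of_le_of_ne (not_lt.mp hlt) (fun h' => heq h'.symm)), ih]
      · rw [if_neg h, if_pos (by omega : start > e)]

-- arr[len(arr)-1] = arr[-1] on a non-empty list.
theorem init_res_eq (arr : List String) (h : arr ≠ []) :
    (PySem.List.pyGet? arr ((arr.length : Int) - 1)).getD "" = (PySem.List.pyGet? arr (-1)).getD "" := by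
  have hl : 0 < arr.length := List.length_pos_iff.mpr h
  rw [PySem.List.pyGet?_neg_one]
  have : ((arr.length : Int) - 1) = ((arr.length - 1 : Nat) : Int) := by omega
  rw [this, PySem.List.pyGet?_natCast]
  rw [List.getLast?_eq_getElem?]

-- ===== VERDICT (by name: the statement is the Claim_ definition above) =====
theorem nextAlphabeticalElement_spec : Claim_equal_nextAlphabeticalElement := by
  intro arr target _hdom hpre
  show nextAlphabeticalElement arr target = nextAlphabeticalElement_alt arr target
  show nextAEloopA arr target (arr.length + 1) 0 ((arr.length : Int) - 1)
        ((PySem.List.pyGet? arr ((arr.length : Int) - 1)).getD "") =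
      nextAEgo arr target (arr.length + 1) 0 ((arr.length : Int) - 1)
        ((PySem.List.pyGet? arr (-1)).getD "")
  rw [init_res_eq arr hpre]
  exact loopA_eq_go arr target _ 0 _ _
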